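-- pv_equiv track=rewrite | github.com/JustinHoyt/interview-practice | JustinHackerRank/set_intersection.py | max_intersection_brute_force
-- ===== SOURCE A (Python) =====
-- def max_intersection_brute_force(sets):
--     if len(sets) <= 1:
--         return -1
--         # map[(0,i)] = map[(o,i-1
--
--     max_intersection = 0
--     best_ignored_intersection = 0
--     for i in range(len(sets)):
--         temp_intersection = set()
--         if i == 0 and len(sets) > 1:
--             temp_intersection = sets[1]
--         else:
--             temp_intersection = sets[0]
--         for j in range(len(sets)):
--             if j != i:
--                 temp_intersection = sets[j].intersection(temp_intersection)
--         if len(temp_intersection) > max_intersection: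
--             max_intersection = len(temp_intersection)
--             best_ignored_intersection = i
--     return best_ignored_intersection
-- ===== SOURCE B (Python) =====
-- def max_intersection_brute_force(sets):
--     # Prefix/suffix intersection arrays: leave-one-out intersection = prefix[i-1] & suffix[i+1].
--     n = len(sets)
--     if n <= 1:
--         return -1
--     prefix = [sets[0]]
--     for k in range(n - 1):
--         prefix.append(prefix[k] & sets[k + 1])
--     suffix = [sets[n - 1]]
--     for k in range(n - 1):
--         suffix.append(suffix[k] & sets[n - 2 - k])
--     # suffix[k] = intersection of sets[n-1-k:]
--     best = 0
--     best_size = len(suffix[n - 2])  # leaving out i = 0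
--     for k in range(n - 2):
--         i = k + 1
--         size = len(prefix[i - 1] & suffix[n - 2 - i])
--         if size > best_size:
--             best_size, best = size, i
--     if len(prefix[n - 2]) > best_size:
--         best = n - 1
--     return best
-- ===== Notes on version B (the rewrite author's own statement) =====
-- stated objective: faster
-- what changed: Replaces the O(n) full re-intersection per candidate index (nested loops) with precomputed prefix and suffix intersection arrays, so each leave-one-out intersection is one intersection prefix[i-1] & suffix[i+1].
import Mathlib
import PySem

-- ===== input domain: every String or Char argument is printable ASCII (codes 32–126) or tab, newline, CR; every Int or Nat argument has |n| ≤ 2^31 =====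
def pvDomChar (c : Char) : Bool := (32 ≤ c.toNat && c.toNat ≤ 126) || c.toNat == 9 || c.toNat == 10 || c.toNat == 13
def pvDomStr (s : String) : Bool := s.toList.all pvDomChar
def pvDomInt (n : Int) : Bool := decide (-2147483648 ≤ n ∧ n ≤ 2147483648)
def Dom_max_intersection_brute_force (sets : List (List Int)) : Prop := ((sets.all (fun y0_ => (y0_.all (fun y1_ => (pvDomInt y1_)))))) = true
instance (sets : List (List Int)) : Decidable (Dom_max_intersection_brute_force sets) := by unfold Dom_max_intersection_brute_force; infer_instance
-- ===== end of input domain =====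

-- B replaces A's per-index full re-intersection with prefix/suffix intersection arrays (leave-one-out = prefix[i-1] ∩ suffix[i+1]).
-- Each Python argument element is a SET; the inner List Int holds its elements and is normalized with set() (PySem.Set.ofList) at entry.

-- ===== PORT A =====
def max_intersection_brute_force (sets : List (List Int)) : Int :=
  let S := sets.map PySem.Set.ofList
  if S.length ≤ 1 then -1
  else
    let n := S.length
    (((List.range n).foldl (fun (st : Nat × Int) (i : Nat) =>
      let seed := if i = 0 ∧ 1 < n then S.getD 1 [] else S.getD 0 []
      let temp := (List.range n).foldl
        (fun t j => if j ≠ i then PySem.Set.inter (S.getD j []) t else t) seed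
      if temp.length > st.1 then (temp.length, (i : Int)) else st) (0, 0)).2)

-- ===== PORT B =====
def max_intersection_brute_force_alt (sets : List (List Int)) : Int :=
  let S := sets.map PySem.Set.ofList
  let n := S.length
  if n ≤ 1 then -1
  else
    let pfx := (List.range (n - 1)).foldl
      (fun (p : List (List Int)) k => p ++ [PySem.Set.inter (p.getD k []) (S.getD (k + 1) [])])
      [S.getD 0 []]
    let sfx := (List.range (n - 1)).foldl
      (fun (p : List (List Int)) k => p ++ [PySem.Set.inter (p.getD k []) (S.getD (n - 2 - k) [])])
      [S.getD (n - 1) []]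
    let st := (List.range (n - 2)).foldl
      (fun (st : Nat × Int) k =>
        let i := k + 1
        let size := (PySem.Set.inter (pfx.getD (i - 1) []) (sfx.getD (n - 2 - i) [])).length
        if size > st.1 then (size, (i : Int)) else st)
      ((sfx.getD (n - 2) []).length, 0)
    if (pfx.getD (n - 2) []).length > st.1 then ((n : Int) - 1) else st.2

-- ===== PRECONDITION & SPEC =====
def Spec_max_intersection_brute_force (sets : List (List Int)) (out : Int) : Prop := out = max_intersection_brute_force_alt sets
instance (sets : List (List Int)) (out : Int) : Decidable (Spec_max_intersection_brute_force sets out) := by unfold Spec_max_intersection_brute_force; infer_instance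

-- ===== CLAIM (what is proved, stated in full; the proofs are below) =====
def Claim_equal_max_intersection_brute_force : Prop := ∀ (sets : List (List Int)), Dom_max_intersection_brute_force sets → Spec_max_intersection_brute_force sets (max_intersection_brute_force sets)

-- ===== LEMMAS AND PROOFS =====

-- size of the leave-i-out intersection as A computes it
def pvSz (S : List (List Int)) (i : Nat) : Nat :=
  ((List.range S.length).foldl
    (fun t j => if j ≠ i then PySem.Set.inter (S.getD j []) t else t)
    (if i = 0 ∧ 1 < S.length then S.getD 1 [] else S.getD 0 [])).length

-- A's outer-loop step, phrased with pvSz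
def pvStep (S : List (List Int)) (st : Nat × Int) (i : Nat) : Nat × Int :=
  if pvSz S i > st.1 then (pvSz S i, (i : Int)) else st

-- prefix intersections: pvIterP S k = S[0] ∩ … ∩ S[k]
def pvIterP (S : List (List Int)) : Nat → List Int
  | 0 => S.getD 0 []
  | k + 1 => PySem.Set.inter (pvIterP S k) (S.getD (k + 1) [])

-- suffix intersections: pvIterQ S n k = S[n-1] ∩ … ∩ S[n-1-k]
def pvIterQ (S : List (List Int)) (n : Nat) : Nat → List Int
  | 0 => S.getD (n - 1) []
  | k + 1 => PySem.Set.inter (pvIterQ S n k) (S.getD (n - 2 - k) [])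

-- membership in all sets except index i
def pvGood (S : List (List Int)) (i : Nat) (x : Int) : Prop :=
  ∀ j, j < S.length → j ≠ i → x ∈ S.getD j []

lemma pv_len_eq {xs ys : List Int} (hx : xs.Nodup) (hy : ys.Nodup)
    (h : ∀ a, a ∈ xs ↔ a ∈ ys) : xs.length = ys.length :=
  ((List.perm_ext_iff_of_nodup hx hy).2 h).length_eq

lemma pv_getD_nodup (sets : List (List Int)) (j : Nat) :
    ((sets.map PySem.Set.ofList).getD j []).Nodup := by
  by_cases hj : j < sets.length
  · rw [List.getD_eq_getElem?_getD, List.getElem?_map]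
    simp only [List.getElem?_eq_getElem hj, Option.map_some, Option.getD_some]
    exact PySem.Set.nodup_ofList _
  · rw [List.getD_eq_getElem?_getD, List.getElem?_eq_none (by simpa using hj)]
    simp

lemma pvA_mem (S : List (List Int)) (i : Nat) (seed : List Int) (m : Nat) (x : Int) :
    x ∈ (List.range m).foldl
        (fun t j => if j ≠ i then PySem.Set.inter (S.getD j []) t else t) seed
      ↔ (x ∈ seed ∧ ∀ j, j < m → j ≠ i → x ∈ S.getD j []) := by
  induction m with
  | zero => simp
  | succ m ih =>
    rw [List.range_succ, List.foldl_append, List.foldl_cons, List.foldl_nil]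
    by_cases hmi : m ≠ i
    · simp only [if_pos hmi, PySem.Set.mem_inter, ih]
      constructor
      · rintro ⟨hm, hs, hall⟩
        refine ⟨hs, fun j hj hji => ?_⟩
        rcases Nat.lt_succ_iff_lt_or_eq.1 hj with h | h
        · exact hall j h hji
        · subst h; exact hm
      · rintro ⟨hs, hall⟩
        exact ⟨hall m (Nat.lt_succ_self m) hmi, hs, fun j hj hji => hall j (Nat.lt_succ_of_lt hj) hji⟩
    · simp only [if_neg hmi, ih]
      rw [Classical.not_not] at hmi; subst hmi
      constructor
      · rintro ⟨hs, hall⟩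
        refine ⟨hs, fun j hj hji => hall j ?_ hji⟩
        rcases Nat.lt_succ_iff_lt_or_eq.1 hj with h | h
        · exact h
        · exact absurd h hji
      · rintro ⟨hs, hall⟩
        exact ⟨hs, fun j hj hji => hall j (Nat.lt_succ_of_lt hj) hji⟩

lemma pvA_nodup (S : List (List Int)) (hS : ∀ j, (S.getD j []).Nodup)
    (i : Nat) (seed : List Int) (hseed : seed.Nodup) (m : Nat) :
    ((List.range m).foldl
      (fun t j => if j ≠ i then PySem.Set.inter (S.getD j []) t else t) seed).Nodup := by
  induction m with
  | zero => simpa using hseed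
  | succ m ih =>
    rw [List.range_succ, List.foldl_append, List.foldl_cons, List.foldl_nil]
    by_cases hmi : m ≠ i
    · simp only [if_pos hmi]
      exact PySem.Set.nodup_inter _ _ (hS m)
    · simpa [if_neg hmi] using ih

lemma pvIterP_nodup (S : List (List Int)) (hS : ∀ j, (S.getD j []).Nodup) (k : Nat) :
    (pvIterP S k).Nodup := by
  induction k with
  | zero => exact hS 0
  | succ k ih => exact PySem.Set.nodup_inter _ _ ih

lemma pvIterQ_nodup (S : List (List Int)) (hS : ∀ j, (S.getD j []).Nodup) (n k : Nat) :
    (pvIterQ S n k).Nodup := by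
  induction k with
  | zero => exact hS _
  | succ k ih => exact PySem.Set.nodup_inter _ _ ih

lemma pv_getD_map (f : Nat → List Int) (M i : Nat) (h : i < M) :
    ((List.range M).map f).getD i [] = f i := by
  rw [List.getD_eq_getElem?_getD, List.getElem?_map, List.getElem?_range h]
  rfl

lemma pvScanP (S : List (List Int)) (M : Nat) :
    (List.range M).foldl
      (fun p k => p ++ [PySem.Set.inter (p.getD k []) (S.getD (k + 1) [])]) [S.getD 0 []]
    = (List.range (M + 1)).map (pvIterP S) := by
  induction M with
  | zero => simp [pvIterP]
  | succ M ih =>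
    rw [List.range_succ, List.foldl_append, List.foldl_cons, List.foldl_nil, ih,
      pv_getD_map (pvIterP S) (M + 1) M (Nat.lt_succ_self M),
      List.range_succ (n := M + 1), List.map_append]
    rfl

lemma pvScanQ (S : List (List Int)) (n : Nat) (M : Nat) :
    (List.range M).foldl
      (fun p k => p ++ [PySem.Set.inter (p.getD k []) (S.getD (n - 2 - k) [])]) [S.getD (n - 1) []]
    = (List.range (M + 1)).map (pvIterQ S n) := by
  induction M with
  | zero => simp [pvIterQ]
  | succ M ih =>
    rw [List.range_succ, List.foldl_append, List.foldl_cons, List.foldl_nil, ih,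
      pv_getD_map (pvIterQ S n) (M + 1) M (Nat.lt_succ_self M),
      List.range_succ (n := M + 1), List.map_append]
    rfl

lemma pvP_mem (S : List (List Int)) (k : Nat) (x : Int) :
    x ∈ pvIterP S k ↔ ∀ j, j ≤ k → x ∈ S.getD j [] := by
  induction k with
  | zero =>
    simp only [pvIterP]
    constructor
    · intro h j hj
      have : j = 0 := Nat.le_zero.1 hj
      subst this; exact h
    · intro h; exact h 0 (Nat.le_refl 0)
  | succ k ih =>
    simp only [pvIterP, PySem.Set.mem_inter, ih]
    constructor
    · rintro ⟨hall, hk⟩ j hj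
      by_cases hje : j = k + 1
      · subst hje; exact hk
      · exact hall j (by omega)
    · intro h
      exact ⟨fun j hj => h j (Nat.le_succ_of_le hj), h (k + 1) (Nat.le_refl _)⟩

lemma pvQ_mem (S : List (List Int)) (n : Nat) (k : Nat) (hk : k ≤ n - 1) (x : Int) :
    x ∈ pvIterQ S n k ↔ ∀ j, n - 1 - k ≤ j → j ≤ n - 1 → x ∈ S.getD j [] := by
  induction k with
  | zero =>
    simp only [pvIterQ]
    constructor
    · intro h j hj1 hj2
      have : j = n - 1 := by omega
      subst this; exact h
    · intro h; exact h (n - 1) (by omega) (by omega)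
  | succ k ih =>
    have hk' : k ≤ n - 1 := by omega
    simp only [pvIterQ, PySem.Set.mem_inter, ih hk']
    constructor
    · rintro ⟨hall, hlast⟩ j hj1 hj2
      by_cases hje : j = n - 2 - k
      · subst hje; exact hlast
      · exact hall j (by omega) hj2
    · intro h
      exact ⟨fun j hj1 hj2 => h j (by omega) hj2, h (n - 2 - k) (by omega) (by omega)⟩

-- A's leave-i-out membership characterization
lemma pvSz_mem (S : List (List Int)) (h2 : 2 ≤ S.length) (i : Nat) (x : Int) :
    x ∈ (List.range S.length).foldl
        (fun t j => if j ≠ i then PySem.Set.inter (S.getD j []) t else t)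
        (if i = 0 ∧ 1 < S.length then S.getD 1 [] else S.getD 0 [])
      ↔ pvGood S i x := by
  rw [pvA_mem]
  unfold pvGood
  constructor
  · rintro ⟨_, hall⟩; exact hall
  · intro hall
    refine ⟨?_, hall⟩
    by_cases h0 : i = 0
    · simp only [h0, true_and, if_pos (by omega : 1 < S.length)]
      exact hall 1 (by omega) (by omega)
    · rw [if_neg (by tauto)]
      exact hall 0 (by omega) (Ne.symm h0)

lemma pv_good_len (S : List (List Int)) (hS : ∀ j, (S.getD j []).Nodup)
    (h2 : 2 ≤ S.length) (i : Nat)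
    (ys : List Int) (hy : ys.Nodup) (hmem : ∀ x, x ∈ ys ↔ pvGood S i x) :
    ys.length = pvSz S i := by
  unfold pvSz
  refine pv_len_eq hy (pvA_nodup S hS i _ ?_ _) ?_
  · split_ifs <;> exact hS _
  · intro a; rw [hmem a, pvSz_mem S h2 i a]

-- the three leave-one-out sizes as B computes them
lemma pvLenQ (S : List (List Int)) (n : Nat) (hS : ∀ j, (S.getD j []).Nodup)
    (hn : S.length = n) (h2 : 2 ≤ n) :
    (pvIterQ S n (n - 2)).length = pvSz S 0 := by
  refine pv_good_len S hS (by omega) 0 _ (pvIterQ_nodup S hS n _) ?_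
  intro x
  rw [pvQ_mem S n (n - 2) (by omega) x]
  unfold pvGood
  constructor
  · intro h j hj hj0; exact h j (by omega) (by omega)
  · intro h j hj1 hj2; exact h j (by omega) (by omega)

lemma pvLenP (S : List (List Int)) (n : Nat) (hS : ∀ j, (S.getD j []).Nodup)
    (hn : S.length = n) (h2 : 2 ≤ n) :
    (pvIterP S (n - 2)).length = pvSz S (n - 1) := by
  refine pv_good_len S hS (by omega) (n - 1) _ (pvIterP_nodup S hS _) ?_
  intro x
  rw [pvP_mem S (n - 2) x]
  unfold pvGood
  constructor
  · intro h j hj hjn; exact h j (by omega)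
  · intro h j hj; exact h j (by omega) (by omega)

lemma pvLenMid (S : List (List Int)) (n : Nat) (hS : ∀ j, (S.getD j []).Nodup)
    (hn : S.length = n) (k : Nat) (hk : k + 2 < n) :
    (PySem.Set.inter (pvIterP S (k + 1 - 1)) (pvIterQ S n (n - 2 - (k + 1)))).length
      = pvSz S (k + 1) := by
  refine pv_good_len S hS (by omega) (k + 1) _
    (PySem.Set.nodup_inter _ _ (pvIterP_nodup S hS _)) ?_
  intro x
  rw [PySem.Set.mem_inter, pvP_mem S (k + 1 - 1) x, pvQ_mem S n (n - 2 - (k + 1)) (by omega) x]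
  unfold pvGood
  have hkk : k + 1 - 1 = k := rfl
  constructor
  · rintro ⟨h1, h2'⟩ j hj hjk
    by_cases hle : j ≤ k
    · exact h1 j (by omega)
    · exact h2' j (by omega) (by omega)
  · intro h
    exact ⟨fun j hj => h j (by omega) (by omega), fun j hj1 hj2 => h j (by omega) (by omega)⟩

lemma pv_foldl_congr {α : Type} (l : List Nat) (f g : α → Nat → α)
    (h : ∀ st k, k ∈ l → f st k = g st k) (init : α) :
    l.foldl f init = l.foldl g init := by
  induction l generalizing init with
  | nil => rfl
  | cons a l ih =>
    rw [List.foldl_cons, List.foldl_cons, h init a (List.mem_cons_self),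
      ih (fun st k hk => h st k (List.mem_cons_of_mem a hk))]

lemma pvStep_zero (S : List (List Int)) : pvStep S (0, 0) 0 = (pvSz S 0, 0) := by
  unfold pvStep
  split_ifs with h
  · rfl
  · have : pvSz S 0 = 0 := by omega
    rw [this]

lemma pv_foldl_range' (S : List (List Int)) (m : Nat) (init : Nat × Int) :
    (List.range' 1 m).foldl (pvStep S) init
      = (List.range m).foldl (fun st k => pvStep S st (k + 1)) init := by
  rw [List.range'_eq_map_range, List.foldl_map]
  exact pv_foldl_congr _ _ _ (fun st k _ => by rw [Nat.add_comm]) init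


lemma pvMid (S : List (List Int)) (m : Nat) (hS : ∀ j, (S.getD j []).Nodup)
    (hm : S.length = m + 2) :
    (List.range (m + 2 - 2)).foldl
      (fun (st : Nat × Int) k =>
        if (PySem.Set.inter (((List.range (m + 2 - 1 + 1)).map (pvIterP S)).getD (k + 1 - 1) [])
              (((List.range (m + 2 - 1 + 1)).map (pvIterQ S (m + 2))).getD (m + 2 - 2 - (k + 1)) [])).length > st.1
        then ((PySem.Set.inter (((List.range (m + 2 - 1 + 1)).map (pvIterP S)).getD (k + 1 - 1) [])
              (((List.range (m + 2 - 1 + 1)).map (pvIterQ S (m + 2))).getD (m + 2 - 2 - (k + 1)) [])).length,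
            ((k + 1 : Nat) : Int))
        else st) (pvSz S 0, 0)
    = (List.range m).foldl (fun st k => pvStep S st (k + 1)) (pvSz S 0, 0) := by
  rw [show m + 2 - 2 = m from rfl]
  refine pv_foldl_congr _ _ _ (fun st k hk => ?_) _
  rw [List.mem_range] at hk
  rw [pv_getD_map _ _ _ (by omega), pv_getD_map _ _ _ (by omega),
    show m - (k + 1) = m + 2 - 2 - (k + 1) from rfl,
    pvLenMid S (m + 2) hS hm k (by omega)]
  rfl

-- ===== VERDICT (by name: the statement is the Claim_ definition above) =====
theorem max_intersection_brute_force_spec : Claim_equal_max_intersection_brute_force := by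
  intro sets _
  unfold Spec_max_intersection_brute_force
  set S := sets.map PySem.Set.ofList with hSdef
  have hS : ∀ j, (S.getD j []).Nodup := fun j => pv_getD_nodup sets j
  by_cases hle : S.length ≤ 1
  · show max_intersection_brute_force sets = max_intersection_brute_force_alt sets
    unfold max_intersection_brute_force max_intersection_brute_force_alt
    rw [← hSdef]
    simp only [if_pos hle]
  · obtain ⟨m, hm⟩ : ∃ m, S.length = m + 2 := ⟨S.length - 2, by omega⟩
    -- A as a fold of pvStep
    have hA : max_intersection_brute_force sets
        = ((List.range (m + 2)).foldl (pvStep S) (0, 0)).2 := by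
      show (if S.length ≤ 1 then (-1 : Int)
        else ((List.range S.length).foldl (pvStep S) (0, 0)).2) = _
      rw [if_neg hle, hm]
    have hrange : List.range (m + 2) = 0 :: (List.range' 1 m ++ [m + 1]) := by
      rw [List.range_eq_range', List.range'_succ, List.range'_concat]
      norm_num
      omega
    have hA2 : max_intersection_brute_force sets
        = (pvStep S ((List.range m).foldl (fun st k => pvStep S st (k + 1)) (pvSz S 0, 0)) (m + 1)).2 := by
      rw [hA, hrange, List.foldl_cons, List.foldl_append, List.foldl_cons, List.foldl_nil,
        pvStep_zero, pv_foldl_range']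
    rw [hA2]
    -- B
    unfold max_intersection_brute_force_alt
    rw [← hSdef]
    simp only []
    rw [if_neg hle, hm]
    rw [pvScanP S (m + 2 - 1), pvScanQ S (m + 2) (m + 2 - 1),
      pv_getD_map _ _ _ (show m + 2 - 2 < m + 2 - 1 + 1 by omega),
      pv_getD_map _ _ _ (show m + 2 - 2 < m + 2 - 1 + 1 by omega),
      pvLenQ S (m + 2) hS hm (by omega), pvLenP S (m + 2) hS hm (by omega), pvMid S m hS hm]
    rw [show (m + 2 - 1 : Nat) = m + 1 from rfl]
    unfold pvStep
    split_ifs with h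
    · show ((m + 1 : Nat) : Int) = ((m + 2 : Nat) : Int) - 1
      push_cast
      ring
    · rfl
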